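-- pv_equiv track=rewrite | github.com/ElinaIskhakova/python_ylab | 1.4.py | solve
-- ===== SOURCE A (Python) =====
-- def solve(s, word):
--     lst = []
--     if word == '':
--         lst.append(''.rjust(len(s), '-'))
--         return lst
--
--     left_s = ''
--     for si in range(len(s)):
--         if word[0] == s[si]:
--             left_s = ''.rjust(si, '-') + s[si]
--             if s[si+1:] == '' and word[1:] == '':
--                 lst.append(left_s)
--             else:
--                 right_s_list = solve(s[si+1:], word[1:])
--                 for right_s in right_s_list:
--                     lst.append(left_s + right_s)
--     return lst
-- ===== SOURCE B (Python) =====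
-- def solve(s, word):
--     n = len(s)
--     partials = [(0, '')]
--     for c in word:
--         nxt = []
--         for start, pref in partials:
--             for i in range(start, n):
--                 if s[i] == c:
--                     nxt.append((i + 1, pref + '-' * (i - start) + c))
--         partials = nxt
--     return [pref + '-' * (n - start) for start, pref in partials]
-- ===== Notes on version B (the rewrite author's own statement) =====
-- stated objective: alternative
-- what changed: Replaced A's recursion on suffixes of s (recomputing sub-solutions per matching position and slicing strings) by an iterative level-by-level expansion: a list of partial matches (next start index, built prefix) is expanded once per character of word, then each survivor is padded with trailing dashes.
import Mathlib
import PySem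

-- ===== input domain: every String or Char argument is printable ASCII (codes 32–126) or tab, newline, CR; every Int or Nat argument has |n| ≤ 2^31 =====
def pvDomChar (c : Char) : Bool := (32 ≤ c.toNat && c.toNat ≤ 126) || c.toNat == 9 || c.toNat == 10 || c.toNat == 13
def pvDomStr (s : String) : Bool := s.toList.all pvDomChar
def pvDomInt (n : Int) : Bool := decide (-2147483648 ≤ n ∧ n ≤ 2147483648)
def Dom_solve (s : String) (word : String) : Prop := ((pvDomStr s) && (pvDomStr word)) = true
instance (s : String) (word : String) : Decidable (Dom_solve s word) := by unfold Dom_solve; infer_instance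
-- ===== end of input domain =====

-- B replaces A's recursion on suffixes of s by an iterative level-by-level expansion
-- of partial matches over the characters of word (objective: alternative decomposition).

-- ===== PORT A =====
-- A's recursion over characters lists; `si` ranges over positions of s, recursing on s[si+1:].
def solveA : List Char → List Char → List (List Char)
  | s, [] => [List.replicate s.length '-']
  | s, w0 :: ws =>
    (List.range s.length).attach.flatMap (fun si =>
      if w0 = s.getD si.1 ' ' then
        let left := List.replicate si.1 '-' ++ [s.getD si.1 ' ']
        if s.drop (si.1 + 1) = [] ∧ ws = [] then [left]
        else (solveA (s.drop (si.1 + 1)) ws).map (fun r => left ++ r)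
      else [])
termination_by s _ => s.length
decreasing_by
  have : si.1 < s.length := List.mem_range.mp si.2
  simp [List.length_drop]; omega

def solve (s : String) (word : String) : List String :=
  (solveA s.toList word.toList).map (fun l => String.ofList l)

-- ===== PORT B =====
-- one expansion step: for a partial (start, pref), scan i in range(start, n) for s[i] == c
def solveBStep (s : List Char) (c : Char) (p : Nat × List Char) : List (Nat × List Char) :=
  (List.range' p.1 (s.length - p.1)).flatMap (fun i =>
    if s.getD i ' ' = c then [(i + 1, p.2 ++ List.replicate (i - p.1) '-' ++ [c])] else [])

def solveB (s w : List Char) : List (List Char) :=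
  let final := w.foldl (fun ps c => ps.flatMap (solveBStep s c)) [(0, ([] : List Char))]
  final.map (fun p => p.2 ++ List.replicate (s.length - p.1) '-')

def solve_alt (s : String) (word : String) : List String :=
  (solveB s.toList word.toList).map (fun l => String.ofList l)

-- ===== PRECONDITION & SPEC =====
def Spec_solve (s : String) (word : String) (out : List String) : Prop := out = solve_alt s word
instance (s : String) (word : String) (out : List String) : Decidable (Spec_solve s word out) := by unfold Spec_solve; infer_instance

-- ===== CLAIM (what is proved, stated in full; the proofs are below) =====
def Claim_equal_solve : Prop := ∀ (s : String) (word : String), Dom_solve s word → Spec_solve s word (solve s word)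

-- ===== LEMMAS AND PROOFS =====

lemma flatMap_congr_mem {α β : Type} (l : List α) (f g : α → List β)
    (h : ∀ a ∈ l, f a = g a) : l.flatMap f = l.flatMap g := by
  induction l with
  | nil => rfl
  | cons x xs ih =>
    simp [List.flatMap_cons, h x (by simp), ih (fun a ha => h a (by simp [ha]))]

lemma attach_flatMap {α β : Type} (l : List α) (g : α → List β) :
    l.attach.flatMap (fun x => g x.1) = l.flatMap g := by
  conv_rhs => rw [← List.attach_map_subtype_val l]
  rw [List.flatMap_map]

lemma foldl_step_flatMap (s : List Char) (w : List Char) (ps : List (Nat × List Char)) :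
    w.foldl (fun ps c => ps.flatMap (solveBStep s c)) ps
      = ps.flatMap (fun p => w.foldl (fun ps c => ps.flatMap (solveBStep s c)) [p]) := by
  induction w generalizing ps with
  | nil => simp
  | cons c w' ih =>
    simp only [List.foldl_cons]
    rw [ih]
    rw [List.flatMap_assoc]
    refine flatMap_congr_mem _ _ _ ?_
    intro p _
    rw [← ih (solveBStep s c p)]
    simp

lemma main_lemma (w : List Char) : ∀ (s : List Char) (start : Nat) (pref : List Char),
    start ≤ s.length →
    (w.foldl (fun ps c => ps.flatMap (solveBStep s c)) [(start, pref)]).map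
        (fun p => p.2 ++ List.replicate (s.length - p.1) '-')
      = (solveA (s.drop start) w).map (fun r => pref ++ r) := by
  induction w with
  | nil =>
    intro s start pref h
    simp [solveA, List.length_drop]
  | cons c w' ih =>
    intro s start pref h
    simp only [List.foldl_cons, List.flatMap_cons, List.flatMap_nil, List.append_nil]
    rw [foldl_step_flatMap, List.map_flatMap]
    have hstep : solveBStep s c (start, pref)
        = (List.range (s.length - start)).flatMap (fun j =>
            if s.getD (start + j) ' ' = c then
              [(start + j + 1, pref ++ List.replicate j '-' ++ [c])] else []) := by
      unfold solveBStep
      simp only []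
      rw [List.range'_eq_map_range, List.flatMap_map]
      refine flatMap_congr_mem _ _ _ ?_
      intro j _
      simp only [Nat.add_sub_cancel_left]
    rw [hstep, List.flatMap_assoc]
    have hlen : (s.drop start).length = s.length - start := by simp
    rw [solveA]
    rw [attach_flatMap _ (fun si =>
      if c = (List.drop start s).getD si ' ' then
        have left := List.replicate si '-' ++ [(List.drop start s).getD si ' ']
        if List.drop (si + 1) (List.drop start s) = [] ∧ w' = [] then [left]
        else List.map (fun r => left ++ r) (solveA (List.drop (si + 1) (List.drop start s)) w')
      else []), List.map_flatMap, hlen]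
    refine flatMap_congr_mem _ _ _ ?_
    intro j hj
    have hj' : j < s.length - start := List.mem_range.mp hj
    have hidx : (List.drop start s).getD j ' ' = s.getD (start + j) ' ' := by
      have h1 : j < (List.drop start s).length := by simp; omega
      have h2 : start + j < s.length := by omega
      rw [List.getD_eq_getElem _ _ h1, List.getD_eq_getElem _ _ h2, List.getElem_drop]
    have hdrop : List.drop (j + 1) (List.drop start s) = List.drop (start + j + 1) s := by
      rw [List.drop_drop]; congr 1
    by_cases hc : s.getD (start + j) ' ' = c
    · have hc' : c = (List.drop start s).getD j ' ' := by rw [hidx, hc]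
      simp only [if_pos hc, if_pos hc', List.flatMap_cons, List.flatMap_nil, List.append_nil]
      rw [ih s (start + j + 1) (pref ++ List.replicate j '-' ++ [c]) (by omega)]
      rw [hdrop, hidx, hc]
      by_cases hend : List.drop (start + j + 1) s = [] ∧ w' = []
      · rcases hend with ⟨h1, h2⟩
        simp [h1, h2, solveA, List.append_assoc]
      · rw [if_neg hend, List.map_map]
        refine List.map_congr_left ?_
        intro r _
        simp [List.append_assoc]
    · have hc' : ¬ (c = (List.drop start s).getD j ' ') := by rw [hidx]; exact fun e => hc e.symm
      rw [if_neg hc, if_neg hc']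
      simp

lemma solveA_eq_solveB (s w : List Char) : solveA s w = solveB s w := by
  have h := main_lemma w s 0 [] (Nat.zero_le _)
  simp at h
  simp [solveB, h]

-- ===== VERDICT (by name: the statement is the Claim_ definition above) =====
theorem solve_spec : Claim_equal_solve := by
  intro s word _
  unfold Spec_solve solve solve_alt
  rw [solveA_eq_solveB]
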